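-- pv_equiv track=rewrite | github.com/Arsen1302/Code-copy-detector | TestData/solutions/problem_1211_4.py | solution_1211_4
-- ===== SOURCE A (Python) =====
-- def solution_1211_4(s: str) -> int:
--
--     res = 0
--     for i in range(len(s)):
--         count = {}
--         for j in range(i, len(s)):
--             # new_s = s[i:j+1]
--             # count = Counter(new_s)
--             count[s[j]] = count.get(s[j], 0) + 1
--             if len(count.values()) > 1:
--                 max_ = max(count.values())
--                 min_ = min(count.values())
--                 res += max_-min_
--     return res
-- ===== SOURCE B (Python) =====
-- def solution_1211_4(s: str) -> int:
--     # Frequency-of-frequencies: per start, maintain counts, bucket sizes ff,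
--     # a running max_/min_ and a distinct counter in O(1) per step, instead of
--     # recomputing max()/min() over all counts at every step.
--     res = 0
--     n = len(s)
--     for i in range(n):
--         cnt = {}
--         ff = {}
--         max_ = 0
--         min_ = 0
--         distinct = 0
--         for j in range(i, n):
--             c = s[j]
--             old = cnt.get(c, 0)
--             cnt[c] = old + 1
--             if old > 0:
--                 left = ff.get(old, 0) - 1
--                 ff[old] = left
--                 if old == min_ and left == 0:
--                     min_ = old + 1
--             else:
--                 distinct += 1
--                 min_ = 1
--             ff[old + 1] = ff.get(old + 1, 0) + 1
--             if old + 1 > max_: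
--                 max_ = old + 1
--             if distinct > 1:
--                 res += max_ - min_
--     return res
-- ===== Notes on version B (the rewrite author's own statement) =====
-- stated objective: faster
-- what changed: Instead of recomputing max() and min() over all character counts at every inner step, B maintains a frequency-of-frequencies dict plus a running max, running min and distinct-character counter, each updated in O(1) per character.
import Mathlib
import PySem

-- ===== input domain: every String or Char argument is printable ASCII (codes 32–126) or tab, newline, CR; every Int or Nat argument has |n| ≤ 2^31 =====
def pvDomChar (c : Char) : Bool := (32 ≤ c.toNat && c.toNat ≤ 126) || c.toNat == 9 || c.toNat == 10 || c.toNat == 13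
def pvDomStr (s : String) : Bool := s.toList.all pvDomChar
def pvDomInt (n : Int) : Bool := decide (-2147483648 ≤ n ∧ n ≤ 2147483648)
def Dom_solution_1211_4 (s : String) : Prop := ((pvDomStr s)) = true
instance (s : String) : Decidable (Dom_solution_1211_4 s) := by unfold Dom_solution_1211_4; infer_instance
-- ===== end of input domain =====

-- B maintains counts, a frequency-of-frequencies dict and running max/min/distinct in O(1)
-- per character instead of recomputing max()/min() over all counts at every inner step.

-- ===== PORT A =====
-- one inner-loop step of A: bump the count of c, then add max-min of the counts if >1 distinct
def stepA (st : PySem.Dict Char Int × Int) (c : Char) : PySem.Dict Char Int × Int :=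
  let count := st.1.insert c (st.1.getD c 0 + 1)
  if count.values.length > 1 then
    (count, st.2 + ((PySem.List.max? count.values (fun x => x)).getD 0
                    - (PySem.List.min? count.values (fun x => x)).getD 0))
  else (count, st.2)

-- body of A's inner 'for j in range(i, len(s))' (s[j] in range always; none = IndexError, unreachable)
def innerA (s : String) (st : PySem.Dict Char Int × Int) (j : Int) : PySem.Dict Char Int × Int :=
  match PySem.Str.pyGet? s j with
  | none => st
  | some c => stepA st c

def solution_1211_4 (s : String) : Int :=
  (PySem.List.pyRange 0 (PySem.Str.len s)).foldl
    (fun res i =>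
      ((PySem.List.pyRange i (PySem.Str.len s)).foldl (innerA s)
        ((PySem.Dict.empty : PySem.Dict Char Int), res)).2)
    0

-- ===== PORT B =====
-- B's inner state: (cnt, ff, max_, min_, distinct, res)
-- one inner-loop step of B: bump cnt[c], move its bucket in ff, update min_/max_/distinct in O(1)
def stepB (st : PySem.Dict Char Int × PySem.Dict Int Int × Int × Int × Int × Int) (c : Char) :
    PySem.Dict Char Int × PySem.Dict Int Int × Int × Int × Int × Int :=
  match st with
  | (cnt, ff, mx, mn, dst, res) =>
    let old := cnt.getD c 0
    let cnt1 := cnt.insert c (old + 1)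
    let p :=
      if old > 0 then
        (ff.insert old (ff.getD old 0 - 1),
         if old = mn ∧ ff.getD old 0 - 1 = 0 then old + 1 else mn,
         dst)
      else (ff, 1, dst + 1)
    let ff1 := p.1
    let mn1 := p.2.1
    let dst1 := p.2.2
    let ff2 := ff1.insert (old + 1) (ff1.getD (old + 1) 0 + 1)
    let mx1 := if old + 1 > mx then old + 1 else mx
    let res1 := if dst1 > 1 then res + (mx1 - mn1) else res
    (cnt1, ff2, mx1, mn1, dst1, res1)

-- body of B's inner loop (s[j] in range always; none = IndexError, unreachable)
def innerB (s : String) (st : PySem.Dict Char Int × PySem.Dict Int Int × Int × Int × Int × Int)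
    (j : Int) : PySem.Dict Char Int × PySem.Dict Int Int × Int × Int × Int × Int :=
  match PySem.Str.pyGet? s j with
  | none => st
  | some c => stepB st c

def solution_1211_4_alt (s : String) : Int :=
  (PySem.List.pyRange 0 (PySem.Str.len s)).foldl
    (fun res i =>
      ((PySem.List.pyRange i (PySem.Str.len s)).foldl (innerB s)
        ((PySem.Dict.empty : PySem.Dict Char Int), (PySem.Dict.empty : PySem.Dict Int Int),
         0, 0, 0, res)).2.2.2.2.2)
    0

-- ===== PRECONDITION & SPEC =====
def Spec_solution_1211_4 (s : String) (out : Int) : Prop := out = solution_1211_4_alt s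
instance (s : String) (out : Int) : Decidable (Spec_solution_1211_4 s out) := by unfold Spec_solution_1211_4; infer_instance

-- ===== CLAIM (what is proved, stated in full; the proofs are below) =====
def Claim_equal_solution_1211_4 : Prop := ∀ (s : String), Dom_solution_1211_4 s → Spec_solution_1211_4 s (solution_1211_4 s)

-- ===== LEMMAS AND PROOFS =====

-- the simulation invariant between A's count dict and B's extra state
def SimInv (count : PySem.Dict Char Int) (ff : PySem.Dict Int Int) (mx mn dst : Int) : Prop :=
  count.keys.Nodup ∧
  (∀ v ∈ count.values, 1 ≤ v) ∧
  (∀ f : Int, ff.getD f 0 = (count.values.count f : Int)) ∧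
  dst = (count.values.length : Int) ∧
  (count.values = [] → mx = 0) ∧
  (count.values ≠ [] → mx ∈ count.values ∧ ∀ y ∈ count.values, y ≤ mx) ∧
  (count.values ≠ [] → mn ∈ count.values ∧ ∀ y ∈ count.values, mn ≤ y)


lemma map_replace_perm (l : List (Char × Int)) (c : Char) (v w : Int)
    (hnd : (l.map Prod.fst).Nodup) (hmem : (c, w) ∈ l) :
    ((l.map (fun p => if p.1 == c then (c, v) else p)).map Prod.snd).Perm
      (v :: (l.map Prod.snd).erase w) := by
  induction l with
  | nil => cases hmem
  | cons p l ih =>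
    rw [List.map_cons, List.nodup_cons] at hnd
    obtain ⟨hp, hnd'⟩ := hnd
    by_cases hpc : p.1 = c
    · have hpw : p = (c, w) := by
        rcases List.mem_cons.mp hmem with h | h
        · exact h.symm
        · exfalso; apply hp; rw [hpc]
          exact List.mem_map_of_mem (f := Prod.fst) h
      have hmap : l.map (fun q => if q.1 == c then (c, v) else q) = l := by
        have h1 : ∀ q ∈ l, (if q.1 == c then (c, v) else q) = q := by
          intro q hq
          have hqc : q.1 ≠ c := by
            intro hqc
            apply hp; rw [hpc, ← hqc]
            exact List.mem_map_of_mem (f := Prod.fst) hq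
          simp [hqc]
        rw [List.map_congr_left h1]; simp
      subst hpw
      simp only [List.map_cons, hmap, beq_self_eq_true, if_pos]
      rw [List.erase_cons_head]
    · have hml : (c, w) ∈ l := by
        rcases List.mem_cons.mp hmem with h | h
        · exact absurd (congrArg Prod.fst h).symm hpc
        · exact h
      have ihh := ih hnd' hml
      have hif : (if p.1 == c then (c, v) else p) = p := by simp [hpc]
      simp only [List.map_cons, hif]
      by_cases hw : p.2 = w
      · subst hw
        rw [List.erase_cons_head]
        have h1 : p.2 ∈ List.map Prod.snd l :=
          List.mem_map_of_mem (f := Prod.snd) (a := (c, p.2)) hml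
        exact (ihh.cons p.2).trans
          ((List.Perm.swap v p.2 _).trans (((List.perm_cons_erase h1).symm).cons v))
      · rw [List.erase_cons_tail (by simp [hw])]
        exact (ihh.cons p.2).trans (List.Perm.swap v p.2 _)

lemma mem_values_of_get? (d : PySem.Dict Char Int) {c : Char} {w : Int}
    (h : d.get? c = some w) : w ∈ d.values := by
  have h1 := PySem.Dict.mem_items_of_get?_eq_some d h
  simpa [PySem.Dict.values] using List.mem_map_of_mem (f := Prod.snd) h1

lemma get?_of_contains (d : PySem.Dict Char Int) {c : Char}
    (hc : d.contains c = true) : d.get? c = some (d.getD c 0) := by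
  have hiso := PySem.Dict.contains_eq_isSome_get? d c
  rw [hc] at hiso
  cases hgw : d.get? c with
  | none => rw [hgw] at hiso; simp at hiso
  | some w => rw [PySem.Dict.getD_eq_get?_getD, hgw]; rfl

lemma values_insert_of_contains (d : PySem.Dict Char Int) {c : Char} (v : Int)
    (hnd : d.keys.Nodup) (hc : d.contains c = true) :
    (d.insert c v).values.Perm (v :: d.values.erase (d.getD c 0)) := by
  have hg := get?_of_contains d hc
  have hmem := PySem.Dict.mem_items_of_get?_eq_some d hg
  have hitems := PySem.Dict.items_insert_of_contains d v hc
  have hnd' : (d.items.map Prod.fst).Nodup := by simpa [PySem.Dict.keys] using hnd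
  simpa [PySem.Dict.values, hitems] using
    map_replace_perm d.items c v (d.getD c 0) hnd' hmem

lemma values_insert_of_not_contains (d : PySem.Dict Char Int) {c : Char} (v : Int)
    (hc : d.contains c = false) :
    (d.insert c v).values = d.values ++ [v] := by
  simp [PySem.Dict.values, PySem.Dict.items_insert_of_not_contains d v hc]

lemma max?_getD_eq {xs : List Int} {m : Int} (hne : xs ≠ [])
    (hmem : m ∈ xs) (hub : ∀ y ∈ xs, y ≤ m) :
    (PySem.List.max? xs (fun x => x)).getD 0 = m := by
  cases hM : PySem.List.max? xs (fun x => x) with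
  | none => exact absurd ((PySem.List.max?_eq_none_iff xs _).mp hM) hne
  | some M =>
    simpa using le_antisymm (hub M (PySem.List.max?_mem hM)) (PySem.List.max?_isMax hM m hmem)

lemma min?_getD_eq {xs : List Int} {m : Int} (hne : xs ≠ [])
    (hmem : m ∈ xs) (hlb : ∀ y ∈ xs, m ≤ y) :
    (PySem.List.min? xs (fun x => x)).getD 0 = m := by
  cases hM : PySem.List.min? xs (fun x => x) with
  | none => exact absurd ((PySem.List.min?_eq_none_iff xs _).mp hM) hne
  | some M =>
    simpa using le_antisymm (PySem.List.min?_isMin hM m hmem) (hlb M (PySem.List.min?_mem hM))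

lemma step_sim (count : PySem.Dict Char Int) (ff : PySem.Dict Int Int) (mx mn dst res : Int)
    (c : Char) (h : SimInv count ff mx mn dst) :
    ∃ cnt' ff' mx' mn' dst' res',
      stepB (count, ff, mx, mn, dst, res) c = (cnt', ff', mx', mn', dst', res') ∧
      stepA (count, res) c = (cnt', res') ∧ SimInv cnt' ff' mx' mn' dst' := by
  obtain ⟨hnd, hpos, hff, hdst, hmx0, hmx, hmn⟩ := h
  by_cases hc : count.contains c = true
  · -- c already counted: its old count w is ≥ 1
    have hgw0 := get?_of_contains count hc
    obtain ⟨w, hold⟩ : ∃ w, count.getD c 0 = w := ⟨_, rfl⟩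
    rw [hold] at hgw0
    have hwmem : w ∈ count.values := mem_values_of_get? count hgw0
    have hcpos : 0 < count.values.count w := List.count_pos_iff.mpr hwmem
    have hwpos : 1 ≤ w := hpos w hwmem
    have hvne : count.values ≠ [] := List.ne_nil_of_mem hwmem
    have hP := values_insert_of_contains count (w + 1) hnd hc
    rw [hold] at hP
    have hQ : count.values.Perm (w :: count.values.erase w) := List.perm_cons_erase hwmem
    have hmemiff : ∀ y, y ∈ (count.insert c (w + 1)).values ↔
        y = w + 1 ∨ y ∈ count.values.erase w := by
      intro y; rw [hP.mem_iff, List.mem_cons]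
    have hlen' : (count.insert c (w + 1)).values.length = count.values.length := by
      rw [hP.length_eq, hQ.length_eq]; simp
    have hvne' : (count.insert c (w + 1)).values ≠ [] :=
      List.ne_nil_of_mem ((hmemiff _).mpr (Or.inl rfl))
    obtain ⟨hmxm, hmxu⟩ := hmx hvne
    obtain ⟨hmnm, hmnl⟩ := hmn hvne
    have hcQ : ∀ f : Int, count.values.count f =
        (count.values.erase w).count f + if w = f then 1 else 0 := by
      intro f
      rw [hQ.count_eq f]
      simp [List.count_cons]
    have hcP : ∀ f : Int, (count.insert c (w + 1)).values.count f =
        (count.values.erase w).count f + if w + 1 = f then 1 else 0 := by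
      intro f
      rw [hP.count_eq f]
      simp [List.count_cons]
    -- the new running max
    have hmx1m : (if w + 1 > mx then w + 1 else mx) ∈ (count.insert c (w + 1)).values := by
      by_cases hgm : w + 1 > mx
      · rw [if_pos hgm]; exact (hmemiff _).mpr (Or.inl rfl)
      · rw [if_neg hgm]
        rcases List.mem_cons.mp (hQ.subset hmxm) with he | he
        · exfalso; omega
        · exact (hmemiff mx).mpr (Or.inr he)
    have hmx1u : ∀ y ∈ (count.insert c (w + 1)).values,
        y ≤ (if w + 1 > mx then w + 1 else mx) := by
      intro y hy
      rcases (hmemiff y).mp hy with rfl | hyr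
      · split_ifs <;> omega
      · have h2 := hmxu y (List.erase_subset hyr)
        split_ifs <;> omega
    -- the new running min
    have hmn1m : (if w = mn ∧ ff.getD w 0 - 1 = 0 then w + 1 else mn) ∈
        (count.insert c (w + 1)).values := by
      by_cases hcondm : w = mn ∧ ff.getD w 0 - 1 = 0
      · rw [if_pos hcondm]; exact (hmemiff _).mpr (Or.inl rfl)
      · rw [if_neg hcondm]
        by_cases hmnw : w = mn
        · have hB : ff.getD w 0 - 1 ≠ 0 := fun hb => hcondm ⟨hmnw, hb⟩
          have hcnt1 : ((count.values.count w : Int)) - 1 ≠ 0 := by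
            rw [← hff w]; exact hB
          have hcw : (count.values.erase w).count w = count.values.count w - 1 :=
            List.count_erase_self ..
          have hp0 : 0 < (count.values.erase w).count w := by omega
          have hp1 : w ∈ count.values.erase w := List.count_pos_iff.mp hp0
          exact (hmemiff mn).mpr (Or.inr (hmnw ▸ hp1))
        · rcases List.mem_cons.mp (hQ.subset hmnm) with he | he
          · exact absurd he.symm hmnw
          · exact (hmemiff mn).mpr (Or.inr he)
    have hmn1l : ∀ y ∈ (count.insert c (w + 1)).values,
        (if w = mn ∧ ff.getD w 0 - 1 = 0 then w + 1 else mn) ≤ y := by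
      intro y hy
      have hmnw : mn ≤ w := hmnl w hwmem
      rcases (hmemiff y).mp hy with rfl | hyr
      · split_ifs with hcondm
        · omega
        · omega
      · have hyv : y ∈ count.values := List.erase_subset hyr
        have h2 := hmnl y hyv
        split_ifs with hcondm
        · obtain ⟨hmnw', hB⟩ := hcondm
          have hcnt1 : ((count.values.count w : Int)) - 1 = 0 := by
            rw [← hff w]; exact hB
          have hcw : (count.values.erase w).count w = count.values.count w - 1 :=
            List.count_erase_self ..
          have h0 : (count.values.erase w).count w = 0 := by omega
          have hnomem : w ∉ count.values.erase w := List.count_eq_zero.mp h0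
          have hyne : y ≠ w := fun hyw => hnomem (hyw ▸ hyr)
          omega
        · exact h2
    have hgt : w > 0 := by omega
    refine ⟨count.insert c (w + 1),
      (ff.insert w (ff.getD w 0 - 1)).insert (w + 1)
        ((ff.insert w (ff.getD w 0 - 1)).getD (w + 1) 0 + 1),
      (if w + 1 > mx then w + 1 else mx),
      (if w = mn ∧ ff.getD w 0 - 1 = 0 then w + 1 else mn),
      dst,
      (if dst > 1 then
        res + ((if w + 1 > mx then w + 1 else mx) -
               (if w = mn ∧ ff.getD w 0 - 1 = 0 then w + 1 else mn))
       else res), ?_, ?_, ?_⟩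
    · show stepB (count, ff, mx, mn, dst, res) c = _
      simp only [stepB]
      rw [hold, if_pos hgt]
    · -- A takes the same step
      simp only [stepA]
      rw [hold]
      have hguard : ((count.insert c (w + 1)).values.length > 1) ↔ (dst > 1) := by
        rw [hlen']; omega
      by_cases hdg : dst > 1
      · rw [if_pos (hguard.mpr hdg), if_pos hdg]
        rw [max?_getD_eq hvne' hmx1m hmx1u, min?_getD_eq hvne' hmn1m hmn1l]
      · rw [if_neg (fun hg1 => hdg (hguard.mp hg1)), if_neg hdg]
    · refine ⟨PySem.Dict.nodup_keys_insert _ _ _ hnd, ?_, ?_, ?_, ?_, ?_, ?_⟩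
      · intro v hv
        rcases (hmemiff v).mp hv with rfl | hvr
        · omega
        · exact hpos v (List.erase_subset hvr)
      · intro f
        have hw1 : (w + 1 : Int) ≠ w := by omega
        rw [PySem.Dict.getD_insert, PySem.Dict.getD_insert, PySem.Dict.getD_insert,
          if_neg hw1, hcP f]
        by_cases h1 : f = w + 1
        · subst h1
          rw [if_pos rfl, if_pos rfl, hff (w + 1)]
          have hq1 := hcQ (w + 1)
          rw [if_neg (show w ≠ w + 1 by omega), add_zero] at hq1
          push_cast
          omega
        · by_cases h2 : f = w
          · rw [if_neg h1, if_pos h2, h2]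
            rw [if_neg (show ¬(w + 1 = w) by omega), add_zero, hff w]
            have hqw := hcQ w
            rw [if_pos rfl] at hqw
            omega
          · rw [if_neg h1, if_neg h2, if_neg (fun he => h1 he.symm), hff f]
            have hqf := hcQ f
            rw [if_neg (fun he => h2 he.symm), add_zero] at hqf
            push_cast
            omega
      · show dst = ((count.insert c (w + 1)).values.length : Int)
        rw [hlen']; exact hdst
      · intro hcon; exact absurd hcon hvne'
      · intro _; exact ⟨hmx1m, hmx1u⟩
      · intro _; exact ⟨hmn1m, hmn1l⟩
  · -- first occurrence of c: old count is 0
    rw [Bool.not_eq_true] at hc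
    have hold0 : count.getD c 0 = 0 := PySem.Dict.getD_of_not_contains count 0 hc
    have hE : (count.insert c (0 + 1)).values = count.values ++ [0 + 1] :=
      values_insert_of_not_contains count (0 + 1) hc
    have hmemiff : ∀ y, y ∈ (count.insert c (0 + 1)).values ↔
        y ∈ count.values ∨ y = 0 + 1 := by
      intro y; rw [hE]; simp
    have hvne' : (count.insert c (0 + 1)).values ≠ [] :=
      List.ne_nil_of_mem ((hmemiff _).mpr (Or.inr rfl))
    have hlen' : (count.insert c (0 + 1)).values.length = count.values.length + 1 := by
      rw [hE]; simp
    have hmx1m : (if 0 + 1 > mx then 0 + 1 else mx) ∈ (count.insert c (0 + 1)).values := by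
      by_cases hve : count.values = []
      · have : mx = 0 := hmx0 hve
        rw [this, if_pos (by omega)]
        exact (hmemiff _).mpr (Or.inr rfl)
      · obtain ⟨hmxm, hmxu⟩ := hmx hve
        have h1 : 1 ≤ mx := hpos mx hmxm
        rw [if_neg (by omega)]
        exact (hmemiff _).mpr (Or.inl hmxm)
    have hmx1u : ∀ y ∈ (count.insert c (0 + 1)).values,
        y ≤ (if 0 + 1 > mx then 0 + 1 else mx) := by
      intro y hy
      rcases (hmemiff y).mp hy with hyv | rfl
      · by_cases hve : count.values = []
        · rw [hve] at hyv; cases hyv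
        · have h2 := (hmx hve).2 y hyv
          split_ifs <;> omega
      · split_ifs <;> omega
    have hmn1m : (1 : Int) ∈ (count.insert c (0 + 1)).values :=
      (hmemiff _).mpr (Or.inr rfl)
    have hmn1l : ∀ y ∈ (count.insert c (0 + 1)).values, (1 : Int) ≤ y := by
      intro y hy
      rcases (hmemiff y).mp hy with hyv | rfl
      · exact hpos y hyv
      · omega
    refine ⟨count.insert c (0 + 1),
      ff.insert (0 + 1) (ff.getD (0 + 1) 0 + 1),
      (if 0 + 1 > mx then 0 + 1 else mx),
      1,
      dst + 1,
      (if dst + 1 > 1 then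
        res + ((if 0 + 1 > mx then 0 + 1 else mx) - 1)
       else res), ?_, ?_, ?_⟩
    · show stepB (count, ff, mx, mn, dst, res) c = _
      simp only [stepB]
      rw [hold0, if_neg (by omega : ¬((0:Int) > 0))]
    · simp only [stepA, hold0]
      have hguard : ((count.insert c (0 + 1)).values.length > 1) ↔ (dst + 1 > 1) := by
        rw [hlen']; omega
      by_cases hdg : dst + 1 > 1
      · rw [if_pos (hguard.mpr hdg), if_pos hdg]
        rw [max?_getD_eq hvne' hmx1m hmx1u, min?_getD_eq hvne' hmn1m hmn1l]
      · rw [if_neg (fun hg1 => hdg (hguard.mp hg1)), if_neg hdg]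
    · refine ⟨PySem.Dict.nodup_keys_insert _ _ _ hnd, ?_, ?_, ?_, ?_, ?_, ?_⟩
      · intro v hv
        rcases (hmemiff v).mp hv with hvv | rfl
        · exact hpos v hvv
        · omega
      · intro f
        rw [PySem.Dict.getD_insert, hE, List.count_append]
        have hcs : List.count f [(0 : Int) + 1] = if f = 0 + 1 then 1 else 0 := by
          by_cases hf : f = 0 + 1
          · rw [if_pos hf, hf]; simp
          · rw [if_neg hf]
            have hf1 : f ≠ 1 := by omega
            rw [List.count_eq_zero]
            simp [hf1]
        rw [hcs]
        by_cases h1 : f = 0 + 1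
        · rw [if_pos h1, if_pos h1, h1, hff (0 + 1)]
          push_cast
          omega
        · rw [if_neg h1, if_neg h1, hff f]
          push_cast
          omega
      · show dst + 1 = ((count.insert c (0 + 1)).values.length : Int)
        rw [hlen']; push_cast; omega
      · intro hcon; exact absurd hcon hvne'
      · intro _; exact ⟨hmx1m, hmx1u⟩
      · intro _; exact ⟨hmn1m, hmn1l⟩

lemma run_sim (s : String) (l : List Int) :
    ∀ count ff mx mn dst res, SimInv count ff mx mn dst →
      (l.foldl (innerB s) (count, ff, mx, mn, dst, res)).2.2.2.2.2 =
        (l.foldl (innerA s) (count, res)).2 := by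
  induction l with
  | nil => intro count ff mx mn dst res _; rfl
  | cons j t ih =>
    intro count ff mx mn dst res h
    rw [List.foldl_cons, List.foldl_cons]
    cases hg : PySem.Str.pyGet? s j with
    | none =>
      simp only [innerA, innerB, hg]
      exact ih count ff mx mn dst res h
    | some c =>
      obtain ⟨cnt', ff', mx', mn', dst', res', hB, hA, hinv⟩ :=
        step_sim count ff mx mn dst res c h
      simp only [innerA, innerB, hg, hA, hB]
      exact ih cnt' ff' mx' mn' dst' res' hinv

lemma SimInv_empty : SimInv PySem.Dict.empty PySem.Dict.empty 0 0 0 := by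
  have hv : (PySem.Dict.empty : PySem.Dict Char Int).values = [] := rfl
  refine ⟨PySem.Dict.nodup_keys_empty, ?_, ?_, ?_, ?_, ?_, ?_⟩
  · intro v hv'; rw [hv] at hv'; cases hv'
  · intro f; rw [PySem.Dict.getD_empty, hv]; simp
  · rw [hv]; simp
  · intro _; rfl
  · intro hne; exact absurd hv hne
  · intro hne; exact absurd hv hne

-- ===== VERDICT (by name: the statement is the Claim_ definition above) =====
theorem solution_1211_4_spec : Claim_equal_solution_1211_4 := by
  intro s _
  unfold Spec_solution_1211_4 solution_1211_4 solution_1211_4_alt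
  apply PySem.List.foldl_congr_mem
  intro res i _
  exact (run_sim s _ _ _ _ _ _ res SimInv_empty).symm
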